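-- pv_equiv track=rewrite | github.com/hasaniqbal777/Fairness-Interpretability-in-Medical-AI-Systems | src/data.py | get_label_vector
-- ===== SOURCE A (Python) =====
-- disease_list = [
--     'Atelectasis', 'Cardiomegaly', 'Consolidation', 'Edema', 'Effusion',
--     'Emphysema', 'Fibrosis', 'Hernia', 'Infiltration', 'Mass',
--     'Nodule', 'Pleural_Thickening', 'Pneumonia', 'Pneumothorax'
-- ]
--
-- def get_label_vector(labels_str, target_classes=None):
--     """Convert label string to a binary vector.
--
--     Args:
--         labels_str: Pipe-separated string of labels (e.g., 'Pneumonia|Effusion')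
--         target_classes: List of class names to include. If None, uses all disease_list classes.
--
--     Returns:
--         Binary vector with 1s for present diseases, 0s otherwise
--     """
--     if target_classes is None:
--         target_classes = disease_list
--
--     labels = labels_str.split('|')
--
--     if labels == ['No Finding']:
--         return [0] * len(target_classes)
--     else:
--         return [1 if disease in labels else 0 for disease in target_classes]
-- ===== SOURCE B (Python) =====
-- disease_list = [
--     'Atelectasis', 'Cardiomegaly', 'Consolidation', 'Edema', 'Effusion',
--     'Emphysema', 'Fibrosis', 'Hernia', 'Infiltration', 'Mass',
--     'Nodule', 'Pleural_Thickening', 'Pneumonia', 'Pneumothorax'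
-- ]
--
-- def get_label_vector(labels_str, target_classes=None):
--     """Convert label string to a binary vector (inverted traversal: scatter by index)."""
--     if target_classes is None:
--         target_classes = disease_list
--
--     labels = labels_str.split('|')
--
--     if labels == ['No Finding']:
--         return [0] * len(target_classes)
--
--     # Build an index: class name -> all of its positions (lists survive duplicates).
--     positions = {}
--     for i, name in enumerate(target_classes):
--         positions.setdefault(name, []).append(i)
--
--     result = [0] * len(target_classes)
--     for lab in labels:
--         for i in positions.get(lab, []):
--             result[i] = 1
--     return result
-- ===== Notes on version B (the rewrite author's own statement) =====
-- stated objective: alternative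
-- what changed: B inverts the traversal: instead of scanning target_classes and testing each class for membership in the labels list, it builds a dict mapping each class name to all of its positions (lists, so duplicate class names survive) and scatters 1s into a zero vector for each label.
import Mathlib
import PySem

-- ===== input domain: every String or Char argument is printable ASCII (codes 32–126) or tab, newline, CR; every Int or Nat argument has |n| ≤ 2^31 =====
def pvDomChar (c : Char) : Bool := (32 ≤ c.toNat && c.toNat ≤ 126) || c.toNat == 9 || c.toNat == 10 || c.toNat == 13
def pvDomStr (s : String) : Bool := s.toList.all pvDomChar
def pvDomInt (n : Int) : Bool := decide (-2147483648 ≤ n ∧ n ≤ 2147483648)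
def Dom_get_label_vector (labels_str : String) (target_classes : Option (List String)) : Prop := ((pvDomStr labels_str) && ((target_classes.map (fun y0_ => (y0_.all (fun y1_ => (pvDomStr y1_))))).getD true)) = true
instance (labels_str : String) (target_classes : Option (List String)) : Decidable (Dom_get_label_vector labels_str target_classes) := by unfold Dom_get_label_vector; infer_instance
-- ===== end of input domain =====

-- B inverts A's traversal: instead of scanning target_classes and testing membership in labels,
-- it builds a name→positions index once and scatters 1s for each label (objective: alternative decomposition).

-- ===== PORT A =====
def disease_list : List String :=
  ["Atelectasis", "Cardiomegaly", "Consolidation", "Edema", "Effusion",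
   "Emphysema", "Fibrosis", "Hernia", "Infiltration", "Mass",
   "Nodule", "Pleural_Thickening", "Pneumonia", "Pneumothorax"]

-- labels_str.split('|'): the separator "|" is a nonempty literal, so Python's split never
-- raises and PySem.Str.split? is always `some`; the .getD [] default is never used.
def get_label_vector (labels_str : String) (target_classes : Option (List String)) : List Int :=
  let tc := target_classes.getD disease_list
  let labels := (PySem.Str.split? labels_str "|").getD []
  if labels = ["No Finding"] then
    List.replicate tc.length (0 : Int)
  else
    tc.map (fun disease => if disease ∈ labels then (1 : Int) else 0)

-- ===== PORT B =====
-- helper: B's first loop, the index dict (class name -> all of its positions)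
-- `positions.setdefault(name, []).append(i)` = d[name] becomes d.get(name, []) ++ [i],
-- i.e. PySem.Dict.modify (new keys append, existing keys keep their position, like setdefault)
def pvPositions (tc : List String) : PySem.Dict String (List Int) :=
  (PySem.List.enumerate tc 0).foldl
    (fun d p => d.modify p.2 [] (fun l => l ++ [p.1])) PySem.Dict.empty

-- helper: B's inner loop (`for i in positions.get(lab, []): result[i] = 1`);
-- result[i] = 1 is pySetD (the indices come from enumerate, so Python never raises here)
def pvScatter (res : List Int) (ixs : List Int) : List Int :=
  ixs.foldl (fun r i => PySem.List.pySetD r i 1) res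

def get_label_vector_alt (labels_str : String) (target_classes : Option (List String)) : List Int :=
  let tc := target_classes.getD disease_list
  let labels := (PySem.Str.split? labels_str "|").getD []
  if labels = ["No Finding"] then
    List.replicate tc.length (0 : Int)
  else
    let positions := pvPositions tc
    let result := List.replicate tc.length (0 : Int)
    labels.foldl (fun res lab => pvScatter res (positions.getD lab [])) result

-- ===== PRECONDITION & SPEC =====
def Spec_get_label_vector (labels_str : String) (target_classes : Option (List String)) (out : List Int) : Prop := out = get_label_vector_alt labels_str target_classes
instance (labels_str : String) (target_classes : Option (List String)) (out : List Int) : Decidable (Spec_get_label_vector labels_str target_classes out) := by unfold Spec_get_label_vector; infer_instance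

-- ===== CLAIM (what is proved, stated in full; the proofs are below) =====
def Claim_equal_get_label_vector : Prop := ∀ (labels_str : String) (target_classes : Option (List String)), Dom_get_label_vector labels_str target_classes → Spec_get_label_vector labels_str target_classes (get_label_vector labels_str target_classes)

-- ===== LEMMAS AND PROOFS =====

-- The index dict records, for each name, exactly the positions filtered from the pair list.
theorem getD_build_positions (ps : List (Int × String)) (d : PySem.Dict String (List Int)) (lab : String) :
    (ps.foldl (fun d p => d.modify p.2 [] (fun l => l ++ [p.1])) d).getD lab []
      = d.getD lab [] ++ ps.filterMap (fun p => if p.2 = lab then some p.1 else none) := by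
  induction ps generalizing d with
  | nil => simp
  | cons p rest ih =>
    simp only [List.foldl_cons, List.filterMap_cons, ih]
    by_cases h : p.2 = lab
    · subst h
      rw [PySem.Dict.getD_modify_self]
      simp
    · rw [PySem.Dict.getD_modify_of_ne _ _ _ (fun e => h e.symm)]
      simp [h]

theorem getD_pvPositions (tc : List String) (lab : String) :
    (pvPositions tc).getD lab []
      = (PySem.List.enumerate tc 0).filterMap (fun p => if p.2 = lab then some p.1 else none) := by
  rw [pvPositions, getD_build_positions]; simp

theorem mem_pvPositions_iff (tc : List String) (lab : String) (j : Nat) (hj : j < tc.length) :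
    ((j : Int) ∈ (pvPositions tc).getD lab []) ↔ tc[j] = lab := by
  rw [getD_pvPositions]
  simp only [List.mem_filterMap, PySem.List.mem_enumerate_iff]
  constructor
  · rintro ⟨p, ⟨k, hk, rfl⟩, hp⟩
    by_cases h : tc[k] = lab
    · simp only [h, if_true, Option.some.injEq] at hp
      have : k = j := by omega
      subst this; exact h
    · simp [h] at hp
  · intro h
    exact ⟨((0 : Int) + j, tc[j]), ⟨j, hj, rfl⟩, by simp [h]⟩

theorem nonneg_pvPositions (tc : List String) (lab : String) :
    ∀ i ∈ (pvPositions tc).getD lab [], 0 ≤ i := by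
  rw [getD_pvPositions]
  intro i hi
  obtain ⟨p, hp, hsome⟩ := List.mem_filterMap.mp hi
  obtain ⟨k, hk, rfl⟩ := (PySem.List.mem_enumerate_iff _ _ _).mp hp
  by_cases h : tc[k] = lab
  · simp only [h, if_true, Option.some.injEq] at hsome
    omega
  · simp [h] at hsome

theorem length_pvScatter (ixs : List Int) (res : List Int) :
    (pvScatter res ixs).length = res.length := by
  induction ixs generalizing res with
  | nil => rfl
  | cons i rest ih =>
    have hstep : pvScatter res (i :: rest) = pvScatter (PySem.List.pySetD res i 1) rest := rfl
    rw [hstep, ih, PySem.List.length_pySetD]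

theorem getElem?_pvScatter (ixs : List Int) (res : List Int) (hpos : ∀ i ∈ ixs, 0 ≤ i)
    (j : Nat) (hj : j < res.length) :
    (pvScatter res ixs)[j]? = some (if (j : Int) ∈ ixs then 1 else res[j]) := by
  induction ixs generalizing res with
  | nil => simp [pvScatter, hj]
  | cons i rest ih =>
    have hnn : 0 ≤ i := hpos i (List.mem_cons_self ..)
    have hstep : pvScatter res (i :: rest) = pvScatter (PySem.List.pySetD res i 1) rest := rfl
    have hset : PySem.List.pySetD res i 1 = res.set i.toNat 1 :=
      PySem.List.pySetD_of_nonneg res 1 hnn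
    have hlen : j < (PySem.List.pySetD res i 1).length := by
      rw [PySem.List.length_pySetD]; exact hj
    rw [hstep, ih (PySem.List.pySetD res i 1) (fun x hx => hpos x (List.mem_cons_of_mem _ hx)) hlen]
    have hgets : (PySem.List.pySetD res i 1)[j]'hlen
        = if i.toNat = j then 1 else res[j] := by
      simp [hset, List.getElem_set]
    by_cases hmem : (j : Int) ∈ rest
    · simp [hmem]
    · by_cases heq : (j : Int) = i
      · have ht : i.toNat = j := by omega
        simp [heq, hgets, ht]
      · have ht : i.toNat ≠ j := by omega
        simp [heq, hgets, ht]

theorem length_scatterAll (tc : List String) (labels : List String) (res : List Int) :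
    (labels.foldl (fun res lab => pvScatter res ((pvPositions tc).getD lab [])) res).length
      = res.length := by
  induction labels generalizing res with
  | nil => rfl
  | cons lab rest ih => rw [List.foldl_cons, ih, length_pvScatter]

theorem getElem?_scatterAll (tc : List String) (labels : List String) (res : List Int)
    (j : Nat) (hj : j < res.length) (hjt : j < tc.length) :
    (labels.foldl (fun res lab => pvScatter res ((pvPositions tc).getD lab [])) res)[j]?
      = some (if tc[j] ∈ labels then 1 else res[j]) := by
  induction labels generalizing res with
  | nil => simp [hj]
  | cons lab rest ih =>
    have hlen : j < (pvScatter res ((pvPositions tc).getD lab [])).length := by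
      rw [length_pvScatter]; exact hj
    rw [List.foldl_cons, ih _ hlen]
    have hone := getElem?_pvScatter ((pvPositions tc).getD lab []) res
      (nonneg_pvPositions tc lab) j hj
    have hval : (pvScatter res ((pvPositions tc).getD lab []))[j]'hlen
        = if (j : Int) ∈ (pvPositions tc).getD lab [] then 1 else res[j] := by
      have := (List.getElem?_eq_getElem hlen).symm.trans hone
      exact Option.some.inj this
    rw [hval]
    simp only [mem_pvPositions_iff tc lab j hjt]
    by_cases h1 : tc[j] ∈ rest
    · simp [h1]
    · by_cases h2 : tc[j] = lab <;> simp [h1, h2]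

-- ===== VERDICT (by name: the statement is the Claim_ definition above) =====
theorem get_label_vector_spec : Claim_equal_get_label_vector := by
  intro labels_str target_classes _
  unfold Spec_get_label_vector get_label_vector get_label_vector_alt
  by_cases h : (PySem.Str.split? labels_str "|").getD [] = ["No Finding"]
  · simp only [h, if_true]
  · simp only [h, if_false]
    apply List.ext_getElem?
    intro j
    by_cases hjt : j < (target_classes.getD disease_list).length
    · have hrep : j < (List.replicate (target_classes.getD disease_list).length (0 : Int)).length := by
        simpa using hjt
      rw [getElem?_scatterAll _ _ _ j hrep hjt]
      simp [hjt]
    · rw [List.getElem?_eq_none (by simpa using hjt),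
        List.getElem?_eq_none (by rw [length_scatterAll]; simpa using hjt)]
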